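-- pv_equiv track=rewrite | github.com/tgergo1/Superblocker | backend/app/services/routing/superblock_router.py | _deduplicate_path
-- ===== SOURCE A (Python) =====
-- def _deduplicate_path(path: list[int]) -> list[int]:
--     """Remove consecutive duplicates from path."""
--     if not path:
--         return path
--
--     result = [path[0]]
--     for node in path[1:]:
--         if node != result[-1]:
--             result.append(node)
--
--     return result
-- ===== SOURCE B (Python) =====
-- def _deduplicate_path(path: list[int]) -> list[int]:
--     """Remove consecutive duplicates by skipping over whole runs of equal nodes."""
--     if not path:
--         return path
--     n = len(path)
--     result = []
--     i = 0
--     while i < n: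
--         result.append(path[i])
--         j = i + 1
--         while j < n and path[j] == path[i]:
--             j += 1
--         i = j
--     return result
-- ===== Notes on version B (the rewrite author's own statement) =====
-- stated objective: alternative
-- what changed: Replaces the single pass that appends each node unequal to the result's last element with a two-pointer run-skipping loop: an inner while advances the index past each whole run of equal nodes and the outer loop appends exactly one representative per run, never consulting the result list.
import Mathlib
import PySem

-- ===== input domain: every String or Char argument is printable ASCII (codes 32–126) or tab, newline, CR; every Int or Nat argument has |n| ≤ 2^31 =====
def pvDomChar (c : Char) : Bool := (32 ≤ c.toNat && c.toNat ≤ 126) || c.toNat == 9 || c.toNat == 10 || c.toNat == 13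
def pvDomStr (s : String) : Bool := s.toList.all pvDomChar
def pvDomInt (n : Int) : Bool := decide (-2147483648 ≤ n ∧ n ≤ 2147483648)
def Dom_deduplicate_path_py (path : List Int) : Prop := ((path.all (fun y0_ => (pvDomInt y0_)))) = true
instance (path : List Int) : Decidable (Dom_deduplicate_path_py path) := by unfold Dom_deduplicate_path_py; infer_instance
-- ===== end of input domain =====

-- B replaces A's append-if-unequal-to-last pass by a two-pointer run-skipping loop
-- (inner while advances past each run of equal nodes); objective: alternative, same cost.

-- ===== PORT A =====
-- result = [path[0]]; for node in path[1:]: if node != result[-1]: result.append(node)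
def deduplicate_path_py (path : List Int) : List Int :=
  match path with
  | [] => path
  | p0 :: rest =>
    rest.foldl (fun result node =>
      if some node ≠ PySem.List.pyGet? result (-1) then result ++ [node] else result) [p0]

-- ===== PORT B =====
-- inner while: j = i+1; while j < n and path[j] == path[i]: j += 1
def pvRunEnd (path : List Int) (v : Int) (j : Nat) : Nat :=
  if _h : j < path.length then
    if path.getD j 0 = v then pvRunEnd path v (j + 1) else j
  else j
termination_by path.length - j

-- the inner while never moves the index backwards (needed for the outer loop's termination)
theorem pvRunEnd_ge (path : List Int) (v : Int) (j : Nat) : j ≤ pvRunEnd path v j := by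
  unfold pvRunEnd
  split
  · split
    · exact Nat.le_trans (Nat.le_succ j) (pvRunEnd_ge path v (j + 1))
    · exact Nat.le_refl j
  · exact Nat.le_refl j
termination_by path.length - j

-- outer while: while i < n: result.append(path[i]); i = <end of the run starting at i>
def pvDedupLoop (path : List Int) (i : Nat) (result : List Int) : List Int :=
  if _h : i < path.length then
    pvDedupLoop path (pvRunEnd path (path.getD i 0) (i + 1)) (result ++ [path.getD i 0])
  else result
termination_by path.length - i
decreasing_by have := pvRunEnd_ge path (path.getD i 0) (i + 1); omega

def deduplicate_path_py_alt (path : List Int) : List Int :=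
  match path with
  | [] => path
  | _ :: _ => pvDedupLoop path 0 []

-- ===== PRECONDITION & SPEC =====
def Spec_deduplicate_path_py (path : List Int) (out : List Int) : Prop := out = deduplicate_path_py_alt path
instance (path : List Int) (out : List Int) : Decidable (Spec_deduplicate_path_py path out) := by unfold Spec_deduplicate_path_py; infer_instance

-- ===== CLAIM (what is proved, stated in full; the proofs are below) =====
def Claim_equal_deduplicate_path_py : Prop := ∀ (path : List Int), Dom_deduplicate_path_py path → Spec_deduplicate_path_py path (deduplicate_path_py path)

-- ===== LEMMAS AND PROOFS =====

-- Abstract list-level form of B's outer loop, used only as a proof intermediary.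
def pvListLoop (result rest : List Int) : List Int :=
  match rest with
  | [] => result
  | h :: t => pvListLoop (result ++ [h]) (t.dropWhile (fun x => x == h))
termination_by rest.length
decreasing_by
  simpa using Nat.lt_succ_of_le (List.length_dropWhile_le (fun x => x == h) t)

-- the index of the inner while corresponds to dropWhile on the suffix
theorem pv_drop_runEnd (path : List Int) (v : Int) (j : Nat) :
    path.drop (pvRunEnd path v j) = (path.drop j).dropWhile (fun x => x == v) := by
  unfold pvRunEnd
  split
  · rename_i h
    rw [List.drop_eq_getElem_cons h]
    split
    · rename_i hv
      rw [List.getD_eq_getElem?_getD, List.getElem?_eq_getElem h] at hv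
      simp only [Option.getD_some] at hv
      rw [pv_drop_runEnd path v (j + 1)]
      simp [List.dropWhile, hv]
    · rename_i hv
      rw [List.getD_eq_getElem?_getD, List.getElem?_eq_getElem h] at hv
      simp only [Option.getD_some] at hv
      rw [List.dropWhile_cons]
      simp [hv]
  · rename_i h
    rw [List.drop_eq_nil_of_le (by omega)]
    simp
termination_by path.length - j

-- B's index loop computes the list-level loop on the remaining suffix
theorem pv_loop_eq_listLoop (path : List Int) (i : Nat) (result : List Int) :
    pvDedupLoop path i result = pvListLoop result (path.drop i) := by
  unfold pvDedupLoop
  split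
  · rename_i h
    have hd : path.drop i = path[i] :: path.drop (i + 1) := List.drop_eq_getElem_cons h
    have hg : path.getD i 0 = path[i] := by
      rw [List.getD_eq_getElem?_getD, List.getElem?_eq_getElem h]; rfl
    rw [pv_loop_eq_listLoop path (pvRunEnd path (path.getD i 0) (i + 1)) (result ++ [path.getD i 0])]
    rw [pv_drop_runEnd, hd, hg]
    simp only [pvListLoop]
  · rename_i h
    rw [List.drop_eq_nil_of_le (by omega)]
    simp [pvListLoop]
termination_by path.length - i
decreasing_by have := pvRunEnd_ge path (path.getD i 0) (i + 1); omega

-- Loop invariant for A: folding A's body over l, starting from an accumulator whose last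
-- element is prev, equals the list-level run loop on l with prev's run removed first.
theorem pv_foldl_eq_listLoop (l : List Int) (acc : List Int) (prev : Int)
    (h : acc.getLast? = some prev) :
    l.foldl (fun result node =>
      if some node ≠ PySem.List.pyGet? result (-1) then result ++ [node] else result) acc
    = pvListLoop acc (l.dropWhile (fun x => x == prev)) := by
  induction l generalizing acc prev with
  | nil => simp [pvListLoop]
  | cons x t ih =>
    simp only [List.foldl_cons, List.dropWhile_cons]
    rw [PySem.List.pyGet?_neg_one, h]
    by_cases hx : x = prev
    · subst hx
      rw [if_neg (by simp), if_pos (by simp)]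
      exact ih acc x h
    · rw [if_pos (by simpa using hx), if_neg (by simpa using hx)]
      rw [ih (acc ++ [x]) x (by simp)]
      simp only [pvListLoop]

-- ===== VERDICT (by name: the statement is the Claim_ definition above) =====
theorem deduplicate_path_py_spec : Claim_equal_deduplicate_path_py := by
  intro path _
  unfold Spec_deduplicate_path_py deduplicate_path_py deduplicate_path_py_alt
  match path with
  | [] => rfl
  | p0 :: rest =>
    simp only
    rw [pv_foldl_eq_listLoop rest [p0] p0 (by simp)]
    rw [pv_loop_eq_listLoop, List.drop_zero]
    simp [pvListLoop]
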